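-- pv_equiv track=rewrite | github.com/AICSSUPERVISOR/true-asi-system | models/s7_layers/layer2_reasoning.py | _parse_react_response
-- ===== SOURCE A (Python) =====
-- from typing import Dict, List, Any, Optional, Tuple
--
-- def _parse_react_response(text: str) -> Tuple[str, str]:
--     """Parse ReAct response into thought and action"""
--     lines = text.split('\n')
--     thought = ""
--     action = ""
--
--     for line in lines:
--         if line.startswith("Thought:"):
--             thought = line.replace("Thought:", "").strip()
--         elif line.startswith("Action:"):
--             action = line.replace("Action:", "").strip()
--
--     return thought, action
-- ===== SOURCE B (Python) =====
-- def _parse_react_response(text: str):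
--     """Parse ReAct response into thought and action (reverse scan, early exit)."""
--     thought = ""
--     action = ""
--     found_thought = False
--     found_action = False
--     for line in reversed(text.split('\n')):
--         if not found_thought and line.startswith("Thought:"):
--             thought = line.replace("Thought:", "").strip()
--             found_thought = True
--         elif not found_action and line.startswith("Action:"):
--             action = line.replace("Action:", "").strip()
--             found_action = True
--         if found_thought and found_action:
--             break
--     return thought, action
-- ===== Notes on version B (the rewrite author's own statement) =====
-- stated objective: alternative
-- what changed: Replaces A's full forward scan that keeps overwriting the last match with a reverse scan carrying two found-flags that stops as soon as both the last Thought: and the last Action: lines are located.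
import Mathlib
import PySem

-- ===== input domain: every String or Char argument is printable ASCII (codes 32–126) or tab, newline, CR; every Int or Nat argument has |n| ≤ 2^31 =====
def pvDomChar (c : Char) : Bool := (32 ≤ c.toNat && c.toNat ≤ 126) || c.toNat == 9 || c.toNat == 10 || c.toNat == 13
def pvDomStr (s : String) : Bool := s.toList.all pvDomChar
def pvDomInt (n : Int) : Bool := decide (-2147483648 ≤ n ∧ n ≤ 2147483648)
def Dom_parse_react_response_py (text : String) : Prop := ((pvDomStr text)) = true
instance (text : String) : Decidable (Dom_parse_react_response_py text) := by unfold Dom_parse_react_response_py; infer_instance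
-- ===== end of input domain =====

-- B replaces A's forward overwrite-the-last-match scan by a reverse scan with two
-- found-flags and an early break (objective: alternative decomposition, same cost).

-- text.split('\n'); the separator is the nonempty literal "\n", so split? is always `some`
-- and getD's default is unreachable (exact Python semantics).
def pvLines (text : String) : List String := (PySem.Str.split? text "\n").getD []

-- ===== PORT A =====
-- forward fold over the lines, last match overwrites
def parse_react_response_py (text : String) : String × String :=
  (pvLines text).foldl
    (fun (ta : String × String) line =>
      if PySem.Str.startswith line "Thought:" then
        (PySem.Str.strip (PySem.Str.replace line "Thought:" ""), ta.2)
      else if PySem.Str.startswith line "Action:" then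
        (ta.1, PySem.Str.strip (PySem.Str.replace line "Action:" ""))
      else ta)
    ("", "")

-- ===== PORT B =====
-- reverse scan with found-flags; returns early once both are found
def pvAltGo : List String → String → String → Bool → Bool → String × String
  | [], t, a, _, _ => (t, a)
  | l :: ls, t, a, ft, fa =>
    if !ft && PySem.Str.startswith l "Thought:" then
      let t' := PySem.Str.strip (PySem.Str.replace l "Thought:" "")
      if fa then (t', a) else pvAltGo ls t' a true fa
    else if !fa && PySem.Str.startswith l "Action:" then
      let a' := PySem.Str.strip (PySem.Str.replace l "Action:" "")
      if ft then (t, a') else pvAltGo ls t a' ft true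
    else
      if ft && fa then (t, a) else pvAltGo ls t a ft fa

def parse_react_response_py_alt (text : String) : String × String :=
  pvAltGo (pvLines text).reverse "" "" false false

-- ===== PRECONDITION & SPEC =====
def Spec_parse_react_response_py (text : String) (out : String × String) : Prop := out = parse_react_response_py_alt text
instance (text : String) (out : String × String) : Decidable (Spec_parse_react_response_py text out) := by unfold Spec_parse_react_response_py; infer_instance

-- ===== CLAIM (what is proved, stated in full; the proofs are below) =====
def Claim_equal_parse_react_response_py : Prop := ∀ (text : String), Dom_parse_react_response_py text → Spec_parse_react_response_py text (parse_react_response_py text)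

-- ===== LEMMAS AND PROOFS =====

def pvPT (l : String) : Bool := PySem.Str.startswith l "Thought:"
def pvPA (l : String) : Bool := PySem.Str.startswith l "Action:"
def pvRT (l : String) : String := PySem.Str.strip (PySem.Str.replace l "Thought:" "")
def pvRA (l : String) : String := PySem.Str.strip (PySem.Str.replace l "Action:" "")

-- result of either program on one coordinate: first match in the (reversed) line list, else default
def pvResT (ls : List String) (t : String) : String :=
  match ls.find? pvPT with | some x => pvRT x | none => t
def pvResA (ls : List String) (a : String) : String :=
  match ls.find? pvPA with | some x => pvRA x | none => a

-- a line cannot start with both "Thought:" and "Action:"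
theorem pv_disjoint (l : String) (h : pvPT l = true) : pvPA l = false := by
  by_contra hA
  rw [Bool.not_eq_false] at hA
  unfold pvPT at h
  unfold pvPA at hA
  rw [PySem.Str.startswith_eq, PySem.Chars.startswith_iff] at h hA
  have hpre : "Action:".toList <+: "Thought:".toList :=
    List.prefix_of_prefix_length_le hA h (by decide)
  exact absurd hpre (by decide)

theorem pvResT_append_singleton (ls : List String) (x : String) (t : String) :
    pvResT (ls ++ [x]) t = pvResT ls (if pvPT x then pvRT x else t) := by
  unfold pvResT
  rw [List.find?_append]
  cases h : ls.find? pvPT with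
  | some y => simp
  | none =>
    by_cases hx : pvPT x
    · simp [List.find?, hx]
    · simp [List.find?, hx]

theorem pvResA_append_singleton (ls : List String) (x : String) (a : String) :
    pvResA (ls ++ [x]) a = pvResA ls (if pvPA x then pvRA x else a) := by
  unfold pvResA
  rw [List.find?_append]
  cases h : ls.find? pvPA with
  | some y => simp
  | none =>
    by_cases hx : pvPA x
    · simp [List.find?, hx]
    · simp [List.find?, hx]

theorem pvResT_cons_neg (x : String) (ls : List String) (t : String) (hx : pvPT x = false) :
    pvResT (x :: ls) t = pvResT ls t := by
  unfold pvResT; simp [List.find?, hx]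

theorem pvResA_cons_neg (x : String) (ls : List String) (a : String) (hx : pvPA x = false) :
    pvResA (x :: ls) a = pvResA ls a := by
  unfold pvResA; simp [List.find?, hx]

theorem pvResT_cons_pos (x : String) (ls : List String) (t : String) (hx : pvPT x = true) :
    pvResT (x :: ls) t = pvRT x := by
  unfold pvResT; simp [List.find?, hx]

theorem pvResA_cons_pos (x : String) (ls : List String) (a : String) (hx : pvPA x = true) :
    pvResA (x :: ls) a = pvRA x := by
  unfold pvResA; simp [List.find?, hx]

-- characterisation of A's fold: both coordinates are "first match in the reversed list"
theorem pvA_char (lines : List String) : ∀ (t a : String),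
    lines.foldl
      (fun (ta : String × String) line =>
        if PySem.Str.startswith line "Thought:" then
          (PySem.Str.strip (PySem.Str.replace line "Thought:" ""), ta.2)
        else if PySem.Str.startswith line "Action:" then
          (ta.1, PySem.Str.strip (PySem.Str.replace line "Action:" ""))
        else ta)
      (t, a)
    = (pvResT lines.reverse t, pvResA lines.reverse a) := by
  induction lines with
  | nil => intro t a; simp [pvResT, pvResA]
  | cons x xs ih =>
    intro t a
    rw [List.foldl_cons]
    rw [List.reverse_cons]
    by_cases hT : pvPT x = true
    · have hA : pvPA x = false := pv_disjoint x hT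
      have hT' : PySem.Str.startswith x "Thought:" = true := hT
      rw [hT']
      simp only [if_true]
      rw [ih, pvResT_append_singleton, pvResA_append_singleton, hT, hA]
      simp [pvRT]
    · have hT' : pvPT x = false := by simpa using hT
      by_cases hA : pvPA x = true
      · have hTs : PySem.Str.startswith x "Thought:" = false := hT'
        have hAs : PySem.Str.startswith x "Action:" = true := hA
        rw [hTs, hAs]
        simp only [Bool.false_eq_true, if_false, if_true]
        rw [ih, pvResT_append_singleton, pvResA_append_singleton, hT', hA]
        simp [pvRA]
      · have hA' : pvPA x = false := by simpa using hA
        have hTs : PySem.Str.startswith x "Thought:" = false := hT'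
        have hAs : PySem.Str.startswith x "Action:" = false := hA'
        rw [hTs, hAs]
        simp only [Bool.false_eq_true, if_false]
        rw [ih, pvResT_append_singleton, pvResA_append_singleton, hT', hA']
        simp

-- characterisation of B's reverse scan with flags
theorem pvB_char (ls : List String) : ∀ (t a : String) (ft fa : Bool),
    pvAltGo ls t a ft fa
      = ((if ft then t else pvResT ls t), (if fa then a else pvResA ls a)) := by
  induction ls with
  | nil => intro t a ft fa; simp [pvAltGo, pvResT, pvResA]
  | cons x xs ih =>
    intro t a ft fa
    unfold pvAltGo
    by_cases h1 : (!ft && PySem.Str.startswith x "Thought:") = true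
    · rw [if_pos h1]
      obtain ⟨hft, hT⟩ := Bool.and_eq_true_iff.mp h1
      have hft : ft = false := by simpa using hft
      have hTx : pvPT x = true := hT
      have hAx : pvPA x = false := pv_disjoint x hTx
      subst hft
      rw [pvResT_cons_pos x xs t hTx, pvResA_cons_neg x xs a hAx]
      by_cases hfa : fa = true
      · subst hfa; simp [pvRT]
      · have hfa' : fa = false := by simpa using hfa
        subst hfa'
        simp only [Bool.false_eq_true, if_false]
        rw [ih]
        simp [pvRT]
    · rw [if_neg h1]
      by_cases h2 : (!fa && PySem.Str.startswith x "Action:") = true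
      · rw [if_pos h2]
        obtain ⟨hfa, hA⟩ := Bool.and_eq_true_iff.mp h2
        have hfa : fa = false := by simpa using hfa
        have hAx : pvPA x = true := hA
        have hTx : pvPT x = false := by
          cases hTv : pvPT x with
          | false => rfl
          | true => rw [pv_disjoint x hTv] at hAx; exact absurd hAx (by decide)
        subst hfa
        rw [pvResA_cons_pos x xs a hAx, pvResT_cons_neg x xs t hTx]
        by_cases hft : ft = true
        · subst hft; simp [pvRA]
        · have hft' : ft = false := by simpa using hft
          subst hft'
          simp only [Bool.false_eq_true, if_false]
          rw [ih]
          simp [pvRA]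
      · rw [if_neg h2]
        by_cases h3 : (ft && fa) = true
        · rw [if_pos h3]
          obtain ⟨hft, hfa⟩ := Bool.and_eq_true_iff.mp h3
          rw [hft, hfa]; simp
        · rw [if_neg h3]
          rw [ih]
          by_cases hft : ft = true
          · have hfa : fa = false := by
              cases fa with
              | false => rfl
              | true => exact absurd (by rw [hft]; rfl) h3
            have hAx : pvPA x = false := by
              cases hAv : pvPA x with
              | false => rfl
              | true => exact absurd (by simp [hfa]; exact hAv) h2
            rw [hft, hfa, pvResA_cons_neg x xs a hAx]
            simp
          · have hft' : ft = false := by simpa using hft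
            have hTx : pvPT x = false := by
              cases hTv : pvPT x with
              | false => rfl
              | true => exact absurd (by simp [hft']; exact hTv) h1
            rw [hft', pvResT_cons_neg x xs t hTx]
            by_cases hfa : fa = true
            · rw [hfa]; simp
            · have hfa' : fa = false := by simpa using hfa
              have hAx : pvPA x = false := by
                cases hAv : pvPA x with
                | false => rfl
                | true => exact absurd (by simp [hfa']; exact hAv) h2
              rw [hfa', pvResA_cons_neg x xs a hAx]

-- ===== VERDICT (by name: the statement is the Claim_ definition above) =====
theorem parse_react_response_py_spec : Claim_equal_parse_react_response_py := by
  intro text _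
  unfold Spec_parse_react_response_py parse_react_response_py parse_react_response_py_alt
  rw [pvA_char, pvB_char]
  simp
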